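-- pv_equiv track=rewrite | github.com/jpmarceaux/QuantumHardwareSubgroup | to_sort/compass.py | pauli2binary
-- ===== SOURCE A (Python) =====
-- def pauli2binary(pstr):
--     """
--     convert pstr to a binary vector
--     """
--     bstr = [0]*2*len(pstr)
--     for idx, c in enumerate(pstr):
--         if c == 'X':
--             bstr[idx] = 1
--         elif c == 'Z':
--             bstr[idx+len(pstr)] = 1
--         elif c == 'Y':
--             bstr[idx] = 1
--             bstr[idx+len(pstr)] = 1
--     return bstr
-- ===== SOURCE B (Python) =====
-- def pauli2binary(pstr):
--     n = len(pstr)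
--     ones = {i for i, c in enumerate(pstr) if c in 'XY'} | \
--            {i + n for i, c in enumerate(pstr) if c in 'ZY'}
--     return [1 if i in ones else 0 for i in range(2 * n)]
-- ===== Notes on version B (the rewrite author's own statement) =====
-- stated objective: alternative
-- what changed: B first builds the sparse support (a set of positions that must be 1: X/Y indices and n-shifted Z/Y indices) and then densifies it by a membership test over range(2n), instead of A's direct branching writes into a preallocated 2n vector.
import Mathlib
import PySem

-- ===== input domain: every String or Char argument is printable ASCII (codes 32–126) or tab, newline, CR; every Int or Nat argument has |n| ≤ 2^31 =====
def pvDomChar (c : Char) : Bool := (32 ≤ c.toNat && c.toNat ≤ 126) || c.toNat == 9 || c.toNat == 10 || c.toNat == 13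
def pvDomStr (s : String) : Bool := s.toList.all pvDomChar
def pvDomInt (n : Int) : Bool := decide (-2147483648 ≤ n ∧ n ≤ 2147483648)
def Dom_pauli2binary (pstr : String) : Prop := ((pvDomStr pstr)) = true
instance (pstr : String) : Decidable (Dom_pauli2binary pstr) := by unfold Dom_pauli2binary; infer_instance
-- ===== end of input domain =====

-- B builds the sparse support set of 1-positions first and then densifies it by a
-- membership test over range(2n), instead of A's branching index writes into a
-- preallocated 2n vector (objective: alternative).

-- ===== PORT A =====
-- literal port: preallocated zero vector of length 2n, enumerate-loop writing by index
def pauli2binary (pstr : String) : List Int :=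
  let l := pstr.toList
  (l.zipIdx).foldl (fun bstr p =>
    if p.1 = 'X' then bstr.set p.2 1
    else if p.1 = 'Z' then bstr.set (p.2 + l.length) 1
    else if p.1 = 'Y' then (bstr.set p.2 1).set (p.2 + l.length) 1
    else bstr) (List.replicate (2 * l.length) 0)

-- ===== PORT B =====
-- literal port of Source B: two set comprehensions over enumerate, union, then densify over range(2n)
def pauli2binary_alt (pstr : String) : List Int :=
  let l := pstr.toList
  let n : Int := l.length
  let ones : PySem.Set Int :=
    PySem.Set.union
      (PySem.Set.ofList ((PySem.List.enumerate l 0).filterMap fun p =>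
        if p.2 = 'X' ∨ p.2 = 'Y' then some p.1 else none))
      ((PySem.List.enumerate l 0).filterMap fun p =>
        if p.2 = 'Z' ∨ p.2 = 'Y' then some (p.1 + n) else none)
  (PySem.List.pyRange 0 (2 * n) 1).map fun i => if PySem.Set.contains ones i then (1 : Int) else 0

-- ===== PRECONDITION & SPEC =====
def Spec_pauli2binary (pstr : String) (out : List Int) : Prop := out = pauli2binary_alt pstr
instance (pstr : String) (out : List Int) : Decidable (Spec_pauli2binary pstr out) := by unfold Spec_pauli2binary; infer_instance

-- ===== CLAIM (what is proved, stated in full; the proofs are below) =====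
def Claim_equal_pauli2binary : Prop := ∀ (pstr : String), Dom_pauli2binary pstr → Spec_pauli2binary pstr (pauli2binary pstr)

-- ===== LEMMAS AND PROOFS =====

def pvFx (c : Char) : Int := if c = 'X' ∨ c = 'Y' then 1 else 0
def pvFz (c : Char) : Int := if c = 'Z' ∨ c = 'Y' then 1 else 0

-- set at the seam of an append
lemma pv_set_seam (xs ys : List Int) (y v : Int) :
    (xs ++ y :: ys).set xs.length v = xs ++ v :: ys := by
  induction xs with
  | nil => simp
  | cons a t ih => simp [ih]

-- loop invariant: folding the remaining suffix over a state whose written prefixes are xpre/zpre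
lemma pv_fold_inv (n : Nat) :
    ∀ (l' : List Char) (xpre zpre : List Int), xpre.length = zpre.length →
    zpre.length + l'.length = n →
    (l'.zipIdx xpre.length).foldl (fun bstr p =>
        if p.1 = 'X' then bstr.set p.2 1
        else if p.1 = 'Z' then bstr.set (p.2 + n) 1
        else if p.1 = 'Y' then (bstr.set p.2 1).set (p.2 + n) 1
        else bstr)
      (xpre ++ List.replicate l'.length 0 ++ (zpre ++ List.replicate l'.length 0))
    = xpre ++ l'.map pvFx ++ (zpre ++ l'.map pvFz) := by
  intro l'
  induction l' with
  | nil => intro xpre zpre _ _; simp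
  | cons c rest ih =>
    intro xpre zpre hxz hn
    simp only [List.length_cons] at hn
    have hseam1 : ∀ v : Int,
        (xpre ++ (0 : Int) :: (List.replicate rest.length 0 ++ (zpre ++ (0:Int) :: List.replicate rest.length 0))).set xpre.length v
        = xpre ++ v :: (List.replicate rest.length 0 ++ (zpre ++ (0:Int) :: List.replicate rest.length 0)) := fun v =>
      pv_set_seam xpre _ 0 v
    have hseam2 : ∀ v w : Int,
        ((xpre ++ v :: (List.replicate rest.length 0 ++ (zpre ++ (0:Int) :: List.replicate rest.length 0)))).set (xpre.length + n) w
        = xpre ++ v :: (List.replicate rest.length 0 ++ (zpre ++ w :: List.replicate rest.length 0)) := by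
      intro v w
      have h := pv_set_seam ((xpre ++ v :: List.replicate rest.length 0) ++ zpre) (List.replicate rest.length 0) 0 w
      have hl : ((xpre ++ v :: List.replicate rest.length 0) ++ zpre).length = xpre.length + n := by
        simp [List.length_append]; omega
      rw [hl] at h
      simpa using h
    have key : ∀ v w : Int, v = pvFx c → w = pvFz c →
        (rest.zipIdx (xpre.length + 1)).foldl (fun bstr p =>
            if p.1 = 'X' then bstr.set p.2 1
            else if p.1 = 'Z' then bstr.set (p.2 + n) 1
            else if p.1 = 'Y' then (bstr.set p.2 1).set (p.2 + n) 1
            else bstr)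
          (xpre ++ v :: (List.replicate rest.length 0 ++ (zpre ++ w :: List.replicate rest.length 0)))
        = xpre ++ (c :: rest).map pvFx ++ (zpre ++ (c :: rest).map pvFz) := by
      intro v w hv hw
      have h1 : xpre ++ v :: (List.replicate rest.length 0 ++ (zpre ++ w :: List.replicate rest.length 0))
          = (xpre ++ [v]) ++ List.replicate rest.length 0 ++ ((zpre ++ [w]) ++ List.replicate rest.length 0) := by
        simp
      have h2 : xpre.length + 1 = (xpre ++ [v]).length := by simp
      rw [h1, h2, ih (xpre ++ [v]) (zpre ++ [w]) (by simp [hxz]) (by simp; omega)]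
      simp [hv, hw]
    simp only [List.zipIdx, List.foldl_cons]
    have hstate : xpre ++ List.replicate (c :: rest).length 0 ++ (zpre ++ List.replicate (c :: rest).length 0)
        = xpre ++ (0:Int) :: (List.replicate rest.length 0 ++ (zpre ++ (0:Int) :: List.replicate rest.length 0)) := by
      simp [List.replicate_succ]
    rw [hstate]
    by_cases hX : c = 'X'
    · subst hX
      rw [if_pos rfl, hseam1 1, key 1 0 (by decide) (by decide)]
    · by_cases hZ : c = 'Z'
      · subst hZ
        rw [if_neg (by decide), if_pos rfl, hseam2 0 1, key 0 1 (by decide) (by decide)]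
      · by_cases hY : c = 'Y'
        · subst hY
          rw [if_neg (by decide), if_neg (by decide), if_pos rfl, hseam1 1, hseam2 1 1,
            key 1 1 (by decide) (by decide)]
        · rw [if_neg hX, if_neg hZ, if_neg hY,
            key 0 0 (by simp [pvFx, hX, hY]) (by simp [pvFz, hZ, hY])]

-- A's fold equals the canonical two-half concatenation
lemma pv_A_canon (pstr : String) :
    pauli2binary pstr = pstr.toList.map pvFx ++ pstr.toList.map pvFz := by
  unfold pauli2binary
  have h := pv_fold_inv pstr.toList.length pstr.toList [] [] rfl (by simp)
  simpa [pvFx, pvFz, two_mul, ← List.replicate_append_replicate] using h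

-- characterization of pvFx/pvFz values
lemma pvFx_eq_one (c : Char) : pvFx c = 1 ↔ (c = 'X' ∨ c = 'Y') := by
  unfold pvFx; split_ifs with h <;> simp [h]

lemma pvFz_eq_one (c : Char) : pvFz c = 1 ↔ (c = 'Z' ∨ c = 'Y') := by
  unfold pvFz; split_ifs with h <;> simp [h]

-- membership in the X-support list of B's port
lemma pv_mem_L1 (l : List Char) (k : Int) :
    k ∈ ((PySem.List.enumerate l 0).filterMap fun p =>
        if p.2 = 'X' ∨ p.2 = 'Y' then some p.1 else none)
      ↔ ∃ j : Nat, j < l.length ∧ k = (j : Int) ∧ (l.getD j ' ' = 'X' ∨ l.getD j ' ' = 'Y') := by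
  rw [PySem.List.enumerate_eq_map_pyRange l ' ', List.filterMap_map, List.mem_filterMap]
  constructor
  · rintro ⟨i, hi, hcond⟩
    rw [PySem.List.mem_pyRange_one, PySem.List.len_eq] at hi
    obtain ⟨h0, hn⟩ := hi
    simp only [Function.comp] at hcond
    by_cases hc : PySem.List.pyGetD l i ' ' = 'X' ∨ PySem.List.pyGetD l i ' ' = 'Y'
    · rw [if_pos hc, Option.some_inj] at hcond
      refine ⟨i.toNat, by omega, by omega, ?_⟩
      rwa [PySem.List.pyGetD_of_nonneg l ' ' h0] at hc
    · rw [if_neg hc] at hcond; exact absurd hcond (by simp)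
  · rintro ⟨j, hj, hk, hc⟩
    refine ⟨(j : Int), ?_, ?_⟩
    · rw [PySem.List.mem_pyRange_one, PySem.List.len_eq]
      exact ⟨by positivity, by exact_mod_cast hj⟩
    · simp only [Function.comp, PySem.List.pyGetD_natCast]
      rw [if_pos hc, hk]

-- membership in the shifted Z-support list of B's port
lemma pv_mem_L2 (l : List Char) (k : Int) :
    k ∈ ((PySem.List.enumerate l 0).filterMap fun p =>
        if p.2 = 'Z' ∨ p.2 = 'Y' then some (p.1 + (l.length : Int)) else none)
      ↔ ∃ j : Nat, j < l.length ∧ k = (j : Int) + l.length ∧ (l.getD j ' ' = 'Z' ∨ l.getD j ' ' = 'Y') := by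
  rw [PySem.List.enumerate_eq_map_pyRange l ' ', List.filterMap_map, List.mem_filterMap]
  constructor
  · rintro ⟨i, hi, hcond⟩
    rw [PySem.List.mem_pyRange_one, PySem.List.len_eq] at hi
    obtain ⟨h0, hn⟩ := hi
    simp only [Function.comp] at hcond
    by_cases hc : PySem.List.pyGetD l i ' ' = 'Z' ∨ PySem.List.pyGetD l i ' ' = 'Y'
    · rw [if_pos hc, Option.some_inj] at hcond
      refine ⟨i.toNat, by omega, by omega, ?_⟩
      rwa [PySem.List.pyGetD_of_nonneg l ' ' h0] at hc
    · rw [if_neg hc] at hcond; exact absurd hcond (by simp)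
  · rintro ⟨j, hj, hk, hc⟩
    refine ⟨(j : Int), ?_, ?_⟩
    · rw [PySem.List.mem_pyRange_one, PySem.List.len_eq]
      exact ⟨by positivity, by exact_mod_cast hj⟩
    · simp only [Function.comp, PySem.List.pyGetD_natCast]
      rw [if_pos hc, hk]

-- B's densified set equals the canonical two-half concatenation
lemma pv_B_canon (pstr : String) :
    pauli2binary_alt pstr = pstr.toList.map pvFx ++ pstr.toList.map pvFz := by
  unfold pauli2binary_alt
  set l := pstr.toList with hl
  apply List.ext_getElem
  · simp [PySem.List.length_pyRange_one, two_mul]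
    omega
  · intro k hk1 hk2
    have hkr : k < 2 * l.length := by
      have := hk1
      simp [PySem.List.length_pyRange_one] at this
      omega
    rw [List.getElem_map, PySem.List.getElem_pyRange_one]
    have hmem : ((0 : Int) + (k : Int) ∈
        PySem.Set.union
          (PySem.Set.ofList ((PySem.List.enumerate l 0).filterMap fun p =>
            if p.2 = 'X' ∨ p.2 = 'Y' then some p.1 else none))
          ((PySem.List.enumerate l 0).filterMap fun p =>
            if p.2 = 'Z' ∨ p.2 = 'Y' then some (p.1 + (l.length : Int)) else none))
        ↔ ((k < l.length ∧ (l.getD k ' ' = 'X' ∨ l.getD k ' ' = 'Y')) ∨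
           (l.length ≤ k ∧ (l.getD (k - l.length) ' ' = 'Z' ∨ l.getD (k - l.length) ' ' = 'Y'))) := by
      rw [zero_add, PySem.Set.mem_union, PySem.Set.mem_ofList, pv_mem_L1, pv_mem_L2]
      constructor
      · rintro (⟨j, hj, hk, hc⟩ | ⟨j, hj, hk, hc⟩)
        · have : k = j := by exact_mod_cast hk
          subst this; exact Or.inl ⟨hj, hc⟩
        · have : k = j + l.length := by exact_mod_cast hk
          subst this
          exact Or.inr ⟨by omega, by simpa using hc⟩
      · rintro (⟨hj, hc⟩ | ⟨h1, hc⟩)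
        · exact Or.inl ⟨k, hj, by omega, hc⟩
        · exact Or.inr ⟨k - l.length, by omega, by omega, hc⟩
    rw [List.getElem_append]
    by_cases hcase : k < (l.map pvFx).length
    · rw [dif_pos hcase, List.getElem_map]
      have hkl : k < l.length := by simpa using hcase
      have hgd : l.getD k ' ' = l[k] := by
        rw [List.getD_eq_getElem?_getD, List.getElem?_eq_getElem hkl, Option.getD_some]
      by_cases hone : pvFx l[k] = 1
      · have hm := hmem.mpr (Or.inl ⟨hkl, by rw [hgd]; exact (pvFx_eq_one _).mp hone⟩)
        rw [if_pos (by simpa [PySem.Set.contains_iff] using hm), hone]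
      · have hzero : pvFx l[k] = 0 := by
          unfold pvFx at hone ⊢; split_ifs at hone ⊢ with h
          · exact absurd rfl hone
          · rfl
        have hnm : ¬ ((0 : Int) + (k : Int) ∈
            PySem.Set.union
              (PySem.Set.ofList ((PySem.List.enumerate l 0).filterMap fun p =>
                if p.2 = 'X' ∨ p.2 = 'Y' then some p.1 else none))
              ((PySem.List.enumerate l 0).filterMap fun p =>
                if p.2 = 'Z' ∨ p.2 = 'Y' then some (p.1 + (l.length : Int)) else none)) := by
          intro hm
          rcases hmem.mp hm with ⟨_, hc⟩ | ⟨hge, _⟩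
          · exact hone ((pvFx_eq_one _).mpr (by rwa [hgd] at hc))
          · omega
        rw [if_neg (by simpa [PySem.Set.contains_iff] using hnm), hzero]
    · rw [dif_neg hcase, List.getElem_map]
      have hge : l.length ≤ k := by simpa using hcase
      have hkl' : k - l.length < l.length := by omega
      have hidx : (l.map pvFx).length = l.length := by simp
      have hgd : l.getD (k - l.length) ' ' = l[k - l.length] := by
        rw [List.getD_eq_getElem?_getD, List.getElem?_eq_getElem hkl', Option.getD_some]
      have hsame : l[k - (l.map pvFx).length] = l[k - l.length]'hkl' := by
        congr 1; omega
      by_cases hone : pvFz (l[k - (l.map pvFx).length]) = 1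
      · have hm := hmem.mpr (Or.inr ⟨hge, by
          rw [hgd, ← hsame]; exact (pvFz_eq_one _).mp hone⟩)
        rw [if_pos (by simpa [PySem.Set.contains_iff] using hm), hone]
      · have hzero : pvFz (l[k - (l.map pvFx).length]) = 0 := by
          unfold pvFz at hone ⊢; split_ifs at hone ⊢ with h
          · exact absurd rfl hone
          · rfl
        have hnm : ¬ ((0 : Int) + (k : Int) ∈
            PySem.Set.union
              (PySem.Set.ofList ((PySem.List.enumerate l 0).filterMap fun p =>
                if p.2 = 'X' ∨ p.2 = 'Y' then some p.1 else none))
              ((PySem.List.enumerate l 0).filterMap fun p =>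
                if p.2 = 'Z' ∨ p.2 = 'Y' then some (p.1 + (l.length : Int)) else none)) := by
          intro hm
          rcases hmem.mp hm with ⟨hlt, _⟩ | ⟨_, hc⟩
          · omega
          · exact hone ((pvFz_eq_one _).mpr (by rw [hsame, ← hgd]; exact hc))
        rw [if_neg (by simpa [PySem.Set.contains_iff] using hnm), hzero]

-- ===== VERDICT (by name: the statement is the Claim_ definition above) =====
theorem pauli2binary_spec : Claim_equal_pauli2binary := by
  intro pstr _
  unfold Spec_pauli2binary
  rw [pv_A_canon, pv_B_canon]
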